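-- pv_equiv track=rewrite | github.com/kkuivi/TCP-Server | socket_server.py | top_border
-- ===== SOURCE A (Python) =====
-- def top_border(canvas):
--     result = ""
--
--     for i in range(len(canvas) + 2):
--         if i == 0:
--             result = "╔"
--         elif i == len(canvas) + 1:
--             result += "╗"
--         else:
--             result += "═"
--
--     return result
-- ===== SOURCE B (Python) =====
-- def top_border(canvas):
--     return "\u2554" + "\u2550" * len(canvas) + "\u2557"
-- ===== Notes on version B (the rewrite author's own statement) =====
-- stated objective: idiomatic
-- what changed: Replaces the index loop with its i==0/last branches by the closed-form string expression '╔' + '═'*len(canvas) + '╗', building the middle by string multiplication in one step.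
import Mathlib
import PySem

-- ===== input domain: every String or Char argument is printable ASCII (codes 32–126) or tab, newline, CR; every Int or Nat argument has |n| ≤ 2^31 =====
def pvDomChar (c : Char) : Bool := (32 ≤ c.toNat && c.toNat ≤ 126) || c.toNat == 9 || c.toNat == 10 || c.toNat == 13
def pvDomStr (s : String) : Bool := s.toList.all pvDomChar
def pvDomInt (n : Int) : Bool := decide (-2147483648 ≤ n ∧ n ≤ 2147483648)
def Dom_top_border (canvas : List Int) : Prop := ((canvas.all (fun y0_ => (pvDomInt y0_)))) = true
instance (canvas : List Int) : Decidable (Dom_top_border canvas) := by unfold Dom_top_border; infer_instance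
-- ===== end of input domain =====

-- B replaces A's index loop (with its i==0/last branches) by the closed form "╔" ++ "═"*len ++ "╗"; same O(n) cost, plainer code.

-- ===== PORT A =====
-- literal port: result = ""; for i in range(len(canvas)+2): branch on i
def top_border (canvas : List Int) : String :=
  (PySem.List.pyRange 0 ((canvas.length : Int) + 2) 1).foldl
    (fun result i =>
      if i == 0 then "╔"
      else if i == (canvas.length : Int) + 1 then result ++ "╗"
      else result ++ "═")
    ""

-- ===== PORT B =====
-- literal port of Source B: "╔" + "═" * len(canvas) + "╗"
def top_border_alt (canvas : List Int) : String :=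
  "╔" ++ String.ofList (List.replicate canvas.length '═') ++ "╗"

-- ===== PRECONDITION & SPEC =====
def Spec_top_border (canvas : List Int) (out : String) : Prop := out = top_border_alt canvas
instance (canvas : List Int) (out : String) : Decidable (Spec_top_border canvas out) := by unfold Spec_top_border; infer_instance

-- ===== CLAIM (what is proved, stated in full; the proofs are below) =====
def Claim_equal_top_border : Prop := ∀ (canvas : List Int), Dom_top_border canvas → Spec_top_border canvas (top_border canvas)

-- ===== LEMMAS AND PROOFS =====

-- the middle of the loop: indices 1..n (with n ≤ N) each append one '═'
theorem top_border_loop_mid (N : Nat) :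
    ∀ (n : Nat), n ≤ N →
      (PySem.List.pyRange 1 ((n : Int) + 1) 1).foldl
        (fun result i =>
          if i == 0 then "╔"
          else if i == (N : Int) + 1 then result ++ "╗"
          else result ++ "═")
        "╔"
      = "╔" ++ String.ofList (List.replicate n '═') := by
  intro n
  induction n with
  | zero =>
    intro _
    rw [PySem.List.pyRange_one_eq_nil (by norm_num)]
    simp
  | succ n ih =>
    intro h
    have h1 : (1 : Int) ≤ (n : Int) + 1 := by omega
    rw [show ((n + 1 : Nat) : Int) + 1 = ((n : Int) + 1) + 1 by push_cast; ring,
        PySem.List.pyRange_one_succ_right h1, List.foldl_append,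
        ih (Nat.le_of_succ_le h)]
    have hne0 : ((n : Int) + 1 == 0) = false := by simp; omega
    have hneN : ((n : Int) + 1 == (N : Int) + 1) = false := by
      simp; omega
    simp only [List.foldl_cons, List.foldl_nil, hne0, hneN, if_false, Bool.false_eq_true]
    apply String.ext
    simp [List.replicate_succ']

theorem top_border_spec : Claim_equal_top_border := by
  intro canvas _
  unfold Spec_top_border top_border top_border_alt
  have h2 : (0 : Int) ≤ (canvas.length : Int) + 1 := by positivity
  rw [show ((canvas.length : Int) + 2) = ((canvas.length : Int) + 1) + 1 by ring,
      PySem.List.pyRange_one_succ_right (by omega : (0:Int) ≤ (canvas.length : Int) + 1),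
      PySem.List.pyRange_one_cons (by omega : (0:Int) < (canvas.length : Int) + 1),
      List.foldl_append]
  rw [show PySem.List.pyRange (0 + 1) ((canvas.length : Int) + 1) 1
        = PySem.List.pyRange 1 ((canvas.length : Int) + 1) 1 by norm_num]
  simp only [List.foldl_cons]
  rw [show ((0 : Int) == 0) = true by decide]
  simp only [if_true]
  rw [top_border_loop_mid canvas.length canvas.length le_rfl]
  have hne0 : ((canvas.length : Int) + 1 == 0) = false := by simp; omega
  simp [hne0]
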